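-- pv_equiv track=rewrite | github.com/will-duncan/p53mdm2 | ode_functions.py | classify_orbit
-- ===== SOURCE A (Python) =====
-- def classify_orbit(domains):
--     """
--     Returns label of "Large" or "Small" based on the thresholds traversed by P.
--     Args:
--     domains: output of get_periodic_domains
--     """
--     seen_low = False
--     seen_high = False
--     for state in domains:
--         if state[2] == 2:
--             seen_high = True
--         elif state[2] == 0:
--             seen_low = True
--         if seen_high and seen_low:
--             return "Large"
--     return "Small"
-- ===== SOURCE B (Python) =====
-- def classify_orbit(domains):
--     hits_low = any(state[2] == 0 for state in domains)
--     hits_high = any(state[2] == 2 for state in domains)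
--     return "Large" if hits_low and hits_high else "Small"
-- ===== Notes on version B (the rewrite author's own statement) =====
-- stated objective: idiomatic
-- what changed: Replaces A's single stateful pass (two boolean flags mutated per element plus an early-return check) by two independent staged any() scans, one per threshold, combined in a final conditional expression.
import Mathlib
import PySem

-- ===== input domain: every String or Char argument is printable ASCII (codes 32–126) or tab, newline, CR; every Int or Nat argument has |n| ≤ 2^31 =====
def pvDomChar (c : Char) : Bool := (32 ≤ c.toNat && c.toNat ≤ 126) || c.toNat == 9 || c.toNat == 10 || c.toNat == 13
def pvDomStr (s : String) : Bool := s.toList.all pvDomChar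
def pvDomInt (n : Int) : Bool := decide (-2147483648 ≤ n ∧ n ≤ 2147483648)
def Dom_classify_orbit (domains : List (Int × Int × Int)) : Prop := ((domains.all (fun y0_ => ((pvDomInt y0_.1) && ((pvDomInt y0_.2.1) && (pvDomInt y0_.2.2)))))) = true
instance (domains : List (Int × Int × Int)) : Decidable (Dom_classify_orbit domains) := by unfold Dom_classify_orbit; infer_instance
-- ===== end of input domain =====

-- B replaces A's single stateful pass (two boolean flags and an early return) by two
-- independent staged any-scans, one per threshold — idiomatic, same cost.

-- ===== PORT A =====
-- A's loop with its two flags and the early return, as structural recursion.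
def classifyOrbitLoop : List (Int × Int × Int) → Bool → Bool → String
  | [], _, _ => "Small"
  | state :: rest, seen_low, seen_high =>
    let seen_high' := if state.2.2 == 2 then true else seen_high
    let seen_low'  := if state.2.2 == 2 then seen_low
                      else if state.2.2 == 0 then true else seen_low
    if seen_high' && seen_low' then "Large"
    else classifyOrbitLoop rest seen_low' seen_high'

def classify_orbit (domains : List (Int × Int × Int)) : String :=
  classifyOrbitLoop domains false false

-- ===== PORT B =====
def classify_orbit_alt (domains : List (Int × Int × Int)) : String :=
  let hits_low := domains.any (fun state => state.2.2 == 0)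
  let hits_high := domains.any (fun state => state.2.2 == 2)
  if hits_low && hits_high then "Large" else "Small"

-- ===== PRECONDITION & SPEC =====
def Spec_classify_orbit (domains : List (Int × Int × Int)) (out : String) : Prop := out = classify_orbit_alt domains
instance (domains : List (Int × Int × Int)) (out : String) : Decidable (Spec_classify_orbit domains out) := by unfold Spec_classify_orbit; infer_instance

-- ===== CLAIM (what is proved, stated in full; the proofs are below) =====
def Claim_equal_classify_orbit : Prop := ∀ (domains : List (Int × Int × Int)), Dom_classify_orbit domains → Spec_classify_orbit domains (classify_orbit domains)

-- ===== LEMMAS AND PROOFS =====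
-- A's loop returns "Large" iff each flag is (or becomes) set, i.e. 0 and 2 are both covered.
theorem classifyOrbitLoop_char (l : List (Int × Int × Int)) (sl sh : Bool)
    (h : (sl && sh) = false) :
    classifyOrbitLoop l sl sh =
      if (sl || l.any (fun s => s.2.2 == 0)) && (sh || l.any (fun s => s.2.2 == 2))
      then "Large" else "Small" := by
  induction l generalizing sl sh with
  | nil => cases sl <;> cases sh <;> simp_all [classifyOrbitLoop]
  | cons hd tl ih =>
    obtain ⟨a, b, c⟩ := hd
    simp only [classifyOrbitLoop, List.any_cons]
    by_cases h2 : c = 2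
    · subst h2
      simp only [show ((2:Int) == 0) = false from rfl, show ((2:Int) == 2) = true from rfl,
        Bool.false_or, Bool.true_or, Bool.or_true, Bool.and_true]
      cases sl
      · norm_num
        rw [ih false true rfl]
        simp only [Bool.false_or, Bool.true_or, Bool.and_true]
      · norm_num
    · by_cases h0 : c = 0
      · subst h0
        simp only [show ((0:Int) == 0) = true from rfl, show ((0:Int) == 2) = false from rfl,
          Bool.false_or, Bool.true_or, Bool.or_true]
        cases sh
        · norm_num
          rw [ih true false rfl]
          simp only [Bool.false_or, Bool.true_or, Bool.true_and]
        · norm_num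
      · have b0 : (c == (0:Int)) = false := beq_eq_false_iff_ne.mpr h0
        have b2 : (c == (2:Int)) = false := beq_eq_false_iff_ne.mpr h2
        simp only [b0, b2, Bool.false_or]
        cases sl <;> cases sh
        · norm_num
          rw [ih false false rfl]
        · norm_num
          rw [ih false true rfl]
        · norm_num
          rw [ih true false rfl]
        · exact absurd h (by norm_num)

-- ===== VERDICT (by name: the statement is the Claim_ definition above) =====
theorem classify_orbit_spec : Claim_equal_classify_orbit := by
  intro domains _
  unfold Spec_classify_orbit classify_orbit classify_orbit_alt
  rw [classifyOrbitLoop_char _ _ _ rfl]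
  simp only [Bool.false_or]
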